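-- pv_equiv track=rewrite | github.com/VinayRuhil/TOC | even a and b.py | simulate_fa
-- ===== SOURCE A (Python) =====
-- def simulate_fa(input_string):
--     # Define states
--     q00, q01, q10, q11 = "q00", "q01", "q10", "q11"
--     current_state = q00  # Start at the initial state
--
--     # Transition function
--     for char in input_string:
--         if char == "a":
--             if current_state == q00:
--                 current_state = q10
--             elif current_state == q01:
--                 current_state = q11
--             elif current_state == q10:
--                 current_state = q00
--             elif current_state == q11:
--                 current_state = q01
--         elif char == "b":
--             if current_state == q00:
--                 current_state = q01
--             elif current_state == q01:
--                 current_state = q00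
--             elif current_state == q10:
--                 current_state = q11
--             elif current_state == q11:
--                 current_state = q10
--         else:
--             # Invalid input
--             return False
--
--     # Check if the final state is accepting
--     return current_state == q00
-- ===== SOURCE B (Python) =====
-- def simulate_fa(input_string):
--     even_a = True
--     even_b = True
--     for char in input_string:
--         if char == "a":
--             even_a = not even_a
--         elif char == "b":
--             even_b = not even_b
--         else:
--             return False
--     return even_a and even_b
-- ===== Notes on version B (the rewrite author's own statement) =====
-- stated objective: simpler
-- what changed: Replaced the four-state joint DFA with its string-labelled transition table by two independent boolean parity trackers flipped per character.
import Mathlib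
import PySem

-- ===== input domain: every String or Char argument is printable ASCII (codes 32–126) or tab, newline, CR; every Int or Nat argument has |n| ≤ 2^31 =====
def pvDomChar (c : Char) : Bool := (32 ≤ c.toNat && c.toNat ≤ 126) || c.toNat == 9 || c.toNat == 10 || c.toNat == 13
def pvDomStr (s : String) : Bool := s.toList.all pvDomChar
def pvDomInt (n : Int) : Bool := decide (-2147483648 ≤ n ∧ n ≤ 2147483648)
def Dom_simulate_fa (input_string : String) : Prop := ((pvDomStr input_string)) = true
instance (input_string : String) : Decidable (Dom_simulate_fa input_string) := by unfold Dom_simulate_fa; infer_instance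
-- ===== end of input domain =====

-- B replaces the four-state string-labelled DFA by two independent boolean parity trackers: simpler.


-- ===== PORT A =====
-- loop over the characters; state is the current state string; an invalid character returns false immediately.
def simulateFaLoopA : List Char → String → Bool
  | [], current_state => current_state == "q00"
  | c :: cs, current_state =>
    if c == 'a' then
      if current_state == "q00" then simulateFaLoopA cs "q10"
      else if current_state == "q01" then simulateFaLoopA cs "q11"
      else if current_state == "q10" then simulateFaLoopA cs "q00"
      else if current_state == "q11" then simulateFaLoopA cs "q01"
      else simulateFaLoopA cs current_state
    else if c == 'b' then
      if current_state == "q00" then simulateFaLoopA cs "q01"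
      else if current_state == "q01" then simulateFaLoopA cs "q00"
      else if current_state == "q10" then simulateFaLoopA cs "q11"
      else if current_state == "q11" then simulateFaLoopA cs "q10"
      else simulateFaLoopA cs current_state
    else false

def simulate_fa (input_string : String) : Bool :=
  simulateFaLoopA input_string.toList "q00"

-- ===== PORT B =====
def simulateFaLoopB : List Char → Bool → Bool → Bool
  | [], even_a, even_b => even_a && even_b
  | c :: cs, even_a, even_b =>
    if c == 'a' then simulateFaLoopB cs (!even_a) even_b
    else if c == 'b' then simulateFaLoopB cs even_a (!even_b)
    else false

def simulate_fa_alt (input_string : String) : Bool :=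
  simulateFaLoopB input_string.toList true true

-- ===== PRECONDITION & SPEC =====
def Spec_simulate_fa (input_string : String) (out : Bool) : Prop := out = simulate_fa_alt input_string
instance (input_string : String) (out : Bool) : Decidable (Spec_simulate_fa input_string out) := by unfold Spec_simulate_fa; infer_instance

-- ===== CLAIM (what is proved, stated in full; the proofs are below) =====
def Claim_equal_simulate_fa : Prop := ∀ (input_string : String), Dom_simulate_fa input_string → Spec_simulate_fa input_string (simulate_fa input_string)

-- ===== LEMMAS AND PROOFS =====

-- state string encoding the two parities
def stateOf (ea eb : Bool) : String :=
  if ea then (if eb then "q00" else "q01") else (if eb then "q10" else "q11")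

theorem loopA_eq_loopB (cs : List Char) (ea eb : Bool) :
    simulateFaLoopA cs (stateOf ea eb) = simulateFaLoopB cs ea eb := by
  induction cs generalizing ea eb with
  | nil => cases ea <;> cases eb <;> simp [simulateFaLoopA, simulateFaLoopB, stateOf]
  | cons c cs ih =>
    cases ea <;> cases eb <;>
      simp only [simulateFaLoopA, simulateFaLoopB, stateOf] <;>
      split_ifs <;>
      simp_all [stateOf, ← ih]

-- ===== VERDICT (by name: the statement is the Claim_ definition above) =====
theorem simulate_fa_spec : Claim_equal_simulate_fa := by
  intro s _
  show simulate_fa s = simulate_fa_alt s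
  have := loopA_eq_loopB s.toList true true
  simpa [simulate_fa, simulate_fa_alt, stateOf] using this
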